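-- pv_equiv track=rewrite | github.com/ankul-in/Two-years | KATA96.py | capitals_first
-- ===== SOURCE A (Python) =====
-- def capitals_first(text):
--     answer=[]
--     for i in text.split():
--         if i[0].isupper():
--             answer.append(i)
--     for i in text.split():
--         if i[0].islower():
--             answer.append(i)
--     return " ".join(answer)
-- ===== SOURCE B (Python) =====
-- def capitals_first(text):
--     words = [w for w in text.split() if w[0].isupper() or w[0].islower()]
--     return " ".join(sorted(words, key=lambda w: not w[0].isupper()))
-- ===== Notes on version B (the rewrite author's own statement) =====
-- stated objective: idiomatic
-- what changed: Replaces A's two filtering passes over text.split() by one filtered word list and a single stable sort keyed on whether the word starts without an uppercase letter, so capitalized words come first and stability preserves in-group order.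
import Mathlib
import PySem

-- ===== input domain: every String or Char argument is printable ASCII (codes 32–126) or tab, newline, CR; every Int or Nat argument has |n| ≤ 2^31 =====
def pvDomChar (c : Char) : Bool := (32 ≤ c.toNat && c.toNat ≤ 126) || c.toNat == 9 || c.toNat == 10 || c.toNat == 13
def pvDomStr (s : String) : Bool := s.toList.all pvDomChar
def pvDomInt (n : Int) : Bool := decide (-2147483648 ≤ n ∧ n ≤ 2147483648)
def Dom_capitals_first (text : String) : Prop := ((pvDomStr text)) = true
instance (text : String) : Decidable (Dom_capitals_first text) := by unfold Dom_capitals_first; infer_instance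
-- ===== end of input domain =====

-- B replaces A's two filtering passes over text.split() by one filtered word list and a single
-- stable sort on a boolean first-char-capitalization key (idiomatic; not claimed faster).


-- ===== PORT A =====
-- i[0].isupper(): split() never yields an empty word, so the 'none' branch is unreachable
def firstUpper (w : String) : Bool :=
  match PySem.Str.pyGet? w 0 with
  | some c => PySem.Chars.isupper c
  | none => false

def firstLower (w : String) : Bool :=
  match PySem.Str.pyGet? w 0 with
  | some c => PySem.Chars.islower c
  | none => false

def capitals_first (text : String) : String :=
  let answer : List String := []
  let answer := (PySem.Str.split₀ text).foldl
    (fun acc i => if firstUpper i then acc ++ [i] else acc) answer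
  let answer := (PySem.Str.split₀ text).foldl
    (fun acc i => if firstLower i then acc ++ [i] else acc) answer
  PySem.Str.join " " answer

-- ===== PORT B =====
def capitals_first_alt (text : String) : String :=
  let words := (PySem.Str.split₀ text).filter (fun w => firstUpper w || firstLower w)
  PySem.Str.join " " (PySem.List.sorted words (fun w => !firstUpper w) false)

-- ===== PRECONDITION & SPEC =====
def Spec_capitals_first (text : String) (out : String) : Prop := out = capitals_first_alt text
instance (text : String) (out : String) : Decidable (Spec_capitals_first text out) := by unfold Spec_capitals_first; infer_instance

-- ===== CLAIM (what is proved, stated in full; the proofs are below) =====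
def Claim_equal_capitals_first : Prop := ∀ (text : String), Dom_capitals_first text → Spec_capitals_first text (capitals_first text)

-- ===== LEMMAS AND PROOFS =====

-- a word's first char cannot be both uppercase and lowercase
lemma not_upper_and_lower (w : String) : ¬ (firstUpper w = true ∧ firstLower w = true) := by
  rintro ⟨h1, h2⟩
  unfold firstUpper at h1; unfold firstLower at h2
  cases h : PySem.Str.pyGet? w 0 with
  | none => rw [h] at h1; simp at h1
  | some c =>
    rw [h] at h1 h2
    simp [PySem.Chars.isupper, PySem.Chars.islower] at h1 h2
    exact absurd (le_trans h2.1 h1.2) (by decide)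

lemma insertBy_part_false {α : Type} (key : α → Bool) (x : α) (hx : key x = false)
    (F T : List α) (hF : ∀ f ∈ F, key f = false) (hT : ∀ t ∈ T, key t = true) :
    PySem.List.insertBy (fun a b => decide (key a < key b)) x (F ++ T) = F ++ x :: T := by
  induction F with
  | nil =>
    cases T with
    | nil => simp [PySem.List.insertBy]
    | cons t ts =>
      have : key t = true := hT t (by simp)
      simp [PySem.List.insertBy, hx, this]
  | cons f fs ih =>
    have hf : key f = false := hF f (by simp)
    simp only [List.cons_append, PySem.List.insertBy, hx, hf]
    simp [ih (fun g hg => hF g (by simp [hg]))]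

lemma insertBy_part_true {α : Type} (key : α → Bool) (x : α) (hx : key x = true)
    (L : List α) :
    PySem.List.insertBy (fun a b => decide (key a < key b)) x L = L ++ [x] := by
  apply PySem.List.insertBy_of_forall_not_before
  intro y hy; simp [hx]

-- stable insertion sort on a boolean key is the two-way partition
lemma foldl_insertBy_part {α : Type} (key : α → Bool) (xs : List α) :
    ∀ (F T : List α), (∀ f ∈ F, key f = false) → (∀ t ∈ T, key t = true) →
    xs.foldl (fun acc x => PySem.List.insertBy (fun a b => decide (key a < key b)) x acc) (F ++ T)
      = (F ++ xs.filter (fun x => !key x)) ++ (T ++ xs.filter key) := by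
  induction xs with
  | nil => intro F T _ _; simp
  | cons x xs ih =>
    intro F T hF hT
    cases h : key x with
    | false =>
      have step : PySem.List.insertBy (fun a b => decide (key a < key b)) x (F ++ T)
          = (F ++ [x]) ++ T := by
        rw [insertBy_part_false key x h F T hF hT]; simp
      have hF' : ∀ f ∈ F ++ [x], key f = false := by
        intro f hf
        rcases List.mem_append.1 hf with hf | hf
        · exact hF f hf
        · simp at hf; subst hf; exact h
      simp only [List.foldl_cons, step, ih (F ++ [x]) T hF' hT]
      simp [h]
    | true =>
      have step : PySem.List.insertBy (fun a b => decide (key a < key b)) x (F ++ T)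
          = F ++ (T ++ [x]) := by
        rw [insertBy_part_true key x h (F ++ T)]; simp
      have hT' : ∀ t ∈ T ++ [x], key t = true := by
        intro t ht
        rcases List.mem_append.1 ht with ht | ht
        · exact hT t ht
        · simp at ht; subst ht; exact h
      simp only [List.foldl_cons, step, ih F (T ++ [x]) hF hT']
      simp [h]

lemma sorted_bool_key_eq_partition {α : Type} (key : α → Bool) (xs : List α) :
    PySem.List.sorted xs key false
      = xs.filter (fun x => !key x) ++ xs.filter key := by
  rw [PySem.List.sorted_eq_foldl_insertBy]
  have := foldl_insertBy_part key xs [] [] (by simp) (by simp)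
  simpa using this

lemma filter_up (ws : List String) :
    (ws.filter (fun w => firstUpper w || firstLower w)).filter
        (fun w => !(!firstUpper w)) = ws.filter (fun w => firstUpper w) := by
  rw [List.filter_filter]
  apply List.filter_congr
  intro w _
  cases h : firstUpper w <;> simp

lemma filter_low (ws : List String) :
    (ws.filter (fun w => firstUpper w || firstLower w)).filter
        (fun w => !firstUpper w) = ws.filter (fun w => firstLower w) := by
  rw [List.filter_filter]
  apply List.filter_congr
  intro w _
  cases h : firstUpper w with
  | true =>
    have hl : firstLower w = false := by
      cases hl : firstLower w
      · rfl
      · exact absurd ⟨h, hl⟩ (not_upper_and_lower w)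
    simp [hl]
  | false => cases hl : firstLower w <;> simp

-- ===== VERDICT (by name: the statement is the Claim_ definition above) =====
theorem capitals_first_spec : Claim_equal_capitals_first := by
  intro text _
  unfold Spec_capitals_first capitals_first capitals_first_alt
  simp only [PySem.List.foldl_append_if, List.nil_append, List.map_id',
    sorted_bool_key_eq_partition, filter_up, filter_low]
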